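-- pv_equiv track=rewrite | github.com/sweenig/chucknorrisunaryencoding | mayan_calculation.py | split_glyphs
-- ===== SOURCE A (Python) =====
-- def split_glyphs(text, width): # creates a list of glyphs from the input text, each glyph is width characters wide
--     lines = text.split('\n')
--     num_glyphs = len(lines[0]) // width # figure out how many glyphs there are in the text
--     glyphs = []
--     for i in range(num_glyphs):
--         glyph = [] # holds the glyph lines
--         for line in lines:
--             glyph.append(line[i*width:(i+1)*width]) # extract the glyph from the lines of the input text
--         glyphs.append('\n'.join(glyph)) # join the lines of each glyph into a single string and add it to the returned list. Each element of this list is a glyph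
--     return glyphs
-- ===== SOURCE B (Python) =====
-- def split_glyphs(text, width):  # single-pass character bucketing: dispatch each char to its glyph by index arithmetic (no slicing)
--     lines = text.split('\n')
--     num_glyphs = len(lines[0]) // width
--     if num_glyphs <= 0:
--         return []
--     buckets = [[] for _ in range(num_glyphs)]
--     first = True
--     for line in lines:
--         if not first:
--             for b in buckets:
--                 b.append('\n')
--         first = False
--         for j, ch in enumerate(line):
--             col = j // width
--             if col < num_glyphs:
--                 buckets[col].append(ch)
--     return [''.join(b) for b in buckets]
-- ===== Notes on version B (the rewrite author's own statement) =====
-- stated objective: alternative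
-- what changed: Replaces A's glyph-by-glyph re-scan of the lines with repeated slicing by a single character-level pass: every character is dispatched into its glyph bucket by index arithmetic (col = j // width), all glyphs being built concurrently, then each bucket is joined once.
import Mathlib
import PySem

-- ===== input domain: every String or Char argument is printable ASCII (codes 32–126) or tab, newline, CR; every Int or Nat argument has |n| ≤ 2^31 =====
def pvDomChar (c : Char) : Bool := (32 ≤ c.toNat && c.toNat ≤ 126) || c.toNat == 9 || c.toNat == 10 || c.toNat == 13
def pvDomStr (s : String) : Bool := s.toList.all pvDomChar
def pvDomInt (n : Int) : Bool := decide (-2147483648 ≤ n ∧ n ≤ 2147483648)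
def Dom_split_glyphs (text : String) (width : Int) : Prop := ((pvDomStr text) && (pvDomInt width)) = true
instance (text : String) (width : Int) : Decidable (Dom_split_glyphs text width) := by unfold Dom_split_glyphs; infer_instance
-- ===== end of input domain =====

-- B builds all glyphs in one character-level pass (each char dispatched to its
-- bucket by index arithmetic) instead of A's per-glyph re-scan with slicing.

-- ===== PORT A =====
-- text.split('\n') is never empty, so lines[0] never raises; ported as headD "".
def split_glyphs (text : String) (width : Int) : List String :=
  let lines : List String := ((PySem.Chars.splitOn text.toList ['\n']).map String.ofList)
  let num_glyphs : Int := PySem.Int.floordiv (PySem.Str.len (lines.headD "")) width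
  (PySem.List.pyRange 0 num_glyphs 1).foldl
    (fun glyphs i =>
      glyphs ++ [PySem.Str.join "\n"
        (lines.foldl (fun glyph line =>
          glyph ++ [PySem.Str.slice line (some (i * width)) (some ((i + 1) * width))]) [])])
    []

-- ===== PORT B =====
-- the inner 'for j, ch in enumerate(line)' loop body of Source B (named so the proofs can cite it)
-- on every reachable state num_glyphs > 0 forces width > 0, so col ≥ 0 and .toNat is exact here
def pvCharStep (width num_glyphs : Int) (bs : List (List Char)) (p : Int × Char) : List (List Char) :=
  let col := PySem.Int.floordiv p.1 width
  if col < num_glyphs then bs.set col.toNat ((bs.getD col.toNat []) ++ [p.2]) else bs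

-- the outer 'for line in lines' loop body of Source B (state = buckets × first-flag)
def pvLineStep (width num_glyphs : Int) (st : List (List Char) × Bool) (line : String) : List (List Char) × Bool :=
  let bs1 := if st.2 then st.1 else st.1.map (fun b => b ++ ['\n'])
  ((PySem.List.enumerate line.toList 0).foldl (pvCharStep width num_glyphs) bs1, false)

def split_glyphs_alt (text : String) (width : Int) : List String :=
  let lines : List String := ((PySem.Chars.splitOn text.toList ['\n']).map String.ofList)
  let num_glyphs : Int := PySem.Int.floordiv (PySem.Str.len (lines.headD "")) width
  if num_glyphs ≤ 0 then []
  else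
    let buckets0 : List (List Char) := List.replicate num_glyphs.toNat []
    ((lines.foldl (pvLineStep width num_glyphs) (buckets0, true)).1).map String.ofList

-- ===== PRECONDITION & SPEC =====
-- width = 0 makes A (and B) raise ZeroDivisionError at '// width'; excluded.
def Pre_split_glyphs (text : String) (width : Int) : Prop := width ≠ 0
instance (text : String) (width : Int) : Decidable (Pre_split_glyphs text width) := by unfold Pre_split_glyphs; infer_instance
def pvWitness_split_glyphs : String × Int := ("ab\ncd", 1)

def Spec_split_glyphs (text : String) (width : Int) (out : List String) : Prop := out = split_glyphs_alt text width
instance (text : String) (width : Int) (out : List String) : Decidable (Spec_split_glyphs text width out) := by unfold Spec_split_glyphs; infer_instance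

-- ===== CLAIM (what is proved, stated in full; the proofs are below) =====
def Claim_equal_split_glyphs : Prop := ∀ (text : String) (width : Int), Dom_split_glyphs text width → Pre_split_glyphs text width → Spec_split_glyphs text width (split_glyphs text width)

-- ===== LEMMAS AND PROOFS =====

-- the chars of line (read from global position j on) that fall into glyph column i
def pvSeg (w i : Nat) : Nat → List Char → List Char
  | _, [] => []
  | j, c :: rest => (if j / w = i then [c] else []) ++ pvSeg w i (j + 1) rest

-- a push-loop is a map
theorem pvFoldlPush {α β : Type} (f : α → β) (l : List α) (acc : List β) :
    l.foldl (fun a x => a ++ [f x]) acc = acc ++ l.map f := by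
  induction l generalizing acc with
  | nil => simp
  | cons x xs ih => simp [List.foldl_cons, ih]

-- splitOn.go never returns []
theorem pvGoNeNil (sep : List Char) : ∀ (fuel : Nat) (l cur : List Char) (acc : List (List Char)),
    PySem.Chars.splitOn.go sep fuel l cur acc ≠ [] := by
  intro fuel
  induction fuel with
  | zero => intro l cur acc; simp [PySem.Chars.splitOn.go]
  | succ n ih =>
    intro l cur acc
    cases l with
    | nil => simp [PySem.Chars.splitOn.go]
    | cons c rest =>
      simp only [PySem.Chars.splitOn.go]
      split
      · exact ih _ _ _
      · exact ih _ _ _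

theorem pvLinesNeNil (text : String) :
    ((PySem.Chars.splitOn text.toList ['\n']).map String.ofList) ≠ [] := by
  simp only [PySem.Chars.splitOn, ne_eq, List.map_eq_nil_iff]
  exact pvGoNeNil _ _ _ _ _

-- any list is the range-map of its getD
theorem pvListAsRangeMap {α : Type} (bs : List α) (d : α) :
    bs = (List.range bs.length).map (fun i => bs.getD i d) := by
  apply List.ext_getElem
  · simp
  · intro i h1 h2
    simp [List.getD_eq_getElem?_getD, List.getElem?_eq_getElem (by simpa using h1)]

-- character fold characterization: bucket i gains exactly the chars of column i
theorem pvCharFold (w ng : Nat) (hw : 0 < w) :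
    ∀ (cs : List Char) (j : Nat) (bs : List (List Char)), bs.length = ng →
    (PySem.List.enumerate cs (j : Int)).foldl (pvCharStep (w : Int) (ng : Int)) bs
      = (List.range ng).map (fun i => bs.getD i [] ++ pvSeg w i j cs) := by
  intro cs
  induction cs with
  | nil =>
    intro j bs hlen
    simp only [PySem.List.enumerate_nil, List.foldl_nil, pvSeg]
    rw [← hlen]; simpa using pvListAsRangeMap bs []
  | cons c rest ih =>
    intro j bs hlen
    rw [PySem.List.enumerate_cons, List.foldl_cons]
    have hj1 : (j : Int) + 1 = ((j + 1 : Nat) : Int) := by push_cast; ring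
    have hstep : pvCharStep (w : Int) (ng : Int) bs ((j : Int), c)
        = if j / w < ng then bs.set (j / w) ((bs.getD (j / w) []) ++ [c]) else bs := by
      simp only [pvCharStep, PySem.Int.floordiv_natCast, Int.toNat_natCast, Nat.cast_lt]
    rw [hj1, hstep]
    by_cases h : j / w < ng
    · rw [if_pos h, ih (j + 1) _ (by simpa using hlen)]
      apply List.map_congr_left
      intro i hi
      have hi' : i < ng := List.mem_range.mp hi
      by_cases hcol : j / w = i
      · subst hcol
        have hset : (bs.set (j / w) ((bs.getD (j / w) []) ++ [c])).getD (j / w) []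
            = bs.getD (j / w) [] ++ [c] := by
          simp [List.getD_eq_getElem?_getD, List.getElem?_set_self, hlen.symm ▸ h]
        rw [hset]
        simp [pvSeg]
      · have hset : (bs.set (j / w) ((bs.getD (j / w) []) ++ [c])).getD i []
            = bs.getD i [] := by
          simp [List.getD_eq_getElem?_getD, List.getElem?_set_ne hcol]
        rw [hset]
        simp [pvSeg, hcol]
    · rw [if_neg h, ih (j + 1) _ hlen]
      apply List.map_congr_left
      intro i hi
      have hi' : i < ng := List.mem_range.mp hi
      have hcol : j / w ≠ i := fun he => h (he ▸ hi')
      simp [pvSeg, hcol]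

-- line fold (first = false): every line contributes '\n' plus its column-i chars
theorem pvLineFold (w ng : Nat) (hw : 0 < w) :
    ∀ (ls : List String) (bs : List (List Char)), bs.length = ng →
    ((ls.foldl (pvLineStep (w : Int) (ng : Int)) (bs, false)).1)
      = (List.range ng).map (fun i => bs.getD i []
          ++ ls.flatMap (fun l => '\n' :: pvSeg w i 0 l.toList)) := by
  intro ls
  induction ls with
  | nil =>
    intro bs hlen
    simp only [List.foldl_nil, List.flatMap_nil, List.append_nil]
    rw [← hlen]; exact pvListAsRangeMap bs []
  | cons l rest ih =>
    intro bs hlen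
    rw [List.foldl_cons]
    have hstep : pvLineStep (w : Int) (ng : Int) (bs, false) l
        = ((PySem.List.enumerate l.toList (0 : Int)).foldl (pvCharStep (w : Int) (ng : Int))
            (bs.map (fun b => b ++ ['\n'])), false) := by
      simp [pvLineStep]
    rw [hstep]
    have h0 : ((0 : Nat) : Int) = (0 : Int) := rfl
    rw [← h0, pvCharFold w ng hw l.toList 0 _ (by simpa using hlen)]
    rw [ih _ (by simp)]
    apply List.map_congr_left
    intro i hi
    have hi' : i < ng := List.mem_range.mp hi
    have hmap : ((List.range ng).map (fun i => (bs.map (fun b => b ++ ['\n'])).getD i []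
        ++ pvSeg w i 0 l.toList)).getD i []
        = (bs.map (fun b => b ++ ['\n'])).getD i [] ++ pvSeg w i 0 l.toList :=
      PySem.List.getD_map_range _ _ _ _ hi'
    rw [hmap]
    have hbs : (bs.map (fun b => b ++ ['\n'])).getD i [] = bs.getD i [] ++ ['\n'] := by
      simp [List.getD_eq_getElem?_getD, List.getElem?_map, hlen.symm ▸ hi',
        List.getElem?_eq_getElem]
    rw [hbs]
    simp [List.flatMap_cons]

-- pvSeg from position j is a clamped take-drop window
theorem pvSegWindow (w i : Nat) (hw : 0 < w) :
    ∀ (cs : List Char) (j : Nat),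
    pvSeg w i j cs = (cs.take ((i + 1) * w - j)).drop (i * w - j) := by
  intro cs
  induction cs with
  | nil => intro j; simp [pvSeg]
  | cons c rest ih =>
    intro j
    simp only [pvSeg]
    rcases Nat.lt_or_ge j (i * w) with hc | hc
    · have hne : j / w ≠ i := by
        have : j / w < i := (Nat.div_lt_iff_lt_mul hw).mpr (by omega)
        omega
      rw [if_neg hne, ih (j + 1)]
      have h1 : (i + 1) * w - j = ((i + 1) * w - (j + 1)) + 1 := by
        have : i * w ≤ (i + 1) * w := Nat.mul_le_mul_right w (by omega)
        omega
      have h2 : i * w - j = (i * w - (j + 1)) + 1 := by omega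
      rw [h1, h2, List.take_succ_cons, List.drop_succ_cons]
      simp
    · rcases Nat.lt_or_ge j ((i + 1) * w) with hc2 | hc2
      · have heq : j / w = i := Nat.div_eq_of_lt_le hc hc2
        rw [if_pos heq, ih (j + 1)]
        have h1 : (i + 1) * w - j = ((i + 1) * w - (j + 1)) + 1 := by omega
        have h2 : i * w - j = 0 := by omega
        have h3 : i * w - (j + 1) = 0 := by omega
        rw [h1, h2, h3, List.take_succ_cons]
        simp
      · have hne : j / w ≠ i := by
          have : i + 1 ≤ j / w := (Nat.le_div_iff_mul_le hw).mpr (by omega)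
          omega
        rw [if_neg hne, ih (j + 1)]
        have h1 : (i + 1) * w - j = 0 := by omega
        have h2 : (i + 1) * w - (j + 1) = 0 := by omega
        rw [h1, h2]
        simp
 
-- join with "\n" over a nonempty list, in flatMap shape
theorem pvJoinShape :
    ∀ (xs : List (List Char)) (x : List Char),
    PySem.Chars.join ['\n'] (x :: xs) = x ++ xs.flatMap (fun y => '\n' :: y) := by
  intro xs
  induction xs with
  | nil => intro x; simp [PySem.Chars.join_singleton]
  | cons y ys ih =>
    intro x
    rw [PySem.Chars.join_cons_cons, ih y]
    simp

-- ===== VERDICT (by name: the statement is the Claim_ definition above) =====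
-- a string equals ofList of its char list
theorem pvStrEqOfToList (a : String) (b : List Char) (h : a.toList = b) : a = String.ofList b := by
  subst h; simp

-- the per-glyph equality: joining a glyph's line slices = its character bucket
theorem pvGlyphEq (w' : Nat) (hw : 0 < w') (k : Nat) (l0 : String) (rest : List String) :
    PySem.Str.join "\n" ((l0 :: rest).map (fun l =>
        PySem.Str.slice l (some ((k : Int) * (w' : Int))) (some (((k : Int) + 1) * (w' : Int)))))
      = String.ofList (pvSeg w' k 0 l0.toList
          ++ rest.flatMap (fun l => '\n' :: pvSeg w' k 0 l.toList)) := by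
  have hslice : ∀ l : String,
      (PySem.Str.slice l (some ((k : Int) * (w' : Int))) (some (((k : Int) + 1) * (w' : Int)))).toList
        = pvSeg w' k 0 l.toList := by
    intro l
    rw [pvSegWindow w' k hw l.toList 0]
    simp only [Nat.sub_zero]
    have h1 : (k : Int) * (w' : Int) = ((k * w' : Nat) : Int) := by push_cast; ring
    have h2 : ((k : Int) + 1) * (w' : Int) = (((k + 1) * w' : Nat) : Int) := by push_cast; ring
    rw [PySem.Str.toList_slice, PySem.Chars.slice_eq_listSlice, h1, h2,
      PySem.List.slice_natCast, List.drop_take]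
  have htl : (PySem.Str.join "\n" ((l0 :: rest).map (fun l =>
      PySem.Str.slice l (some ((k : Int) * (w' : Int))) (some (((k : Int) + 1) * (w' : Int)))))).toList
      = pvSeg w' k 0 l0.toList ++ rest.flatMap (fun l => '\n' :: pvSeg w' k 0 l.toList) := by
    rw [PySem.Str.toList_join]
    have : ("\n".toList : List Char) = ['\n'] := rfl
    rw [this, List.map_map, List.map_cons, Function.comp_apply, hslice, pvJoinShape]
    congr 1
    rw [List.flatMap_map]
    congr 1
    funext l
    simp [hslice l]
  exact pvStrEqOfToList _ _ htl

-- ===== VERDICT (by name: the statement is the Claim_ definition above) =====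
theorem split_glyphs_spec : Claim_equal_split_glyphs := by
  intro text width _ hpre
  unfold Spec_split_glyphs split_glyphs split_glyphs_alt
  simp only []
  by_cases hng0 : PySem.Int.floordiv
      (PySem.Str.len ((((PySem.Chars.splitOn text.toList ['\n']).map String.ofList)).headD "")) width ≤ 0
  · rw [if_pos hng0, PySem.List.pyRange_one_eq_nil hng0]
    simp
  · rw [if_neg hng0]
    push_neg at hng0
    have hwpos : 0 < width := by
      rcases lt_trichotomy width 0 with h | h | h
      · exfalso
        have hle : PySem.Int.floordiv
            (PySem.Str.len ((((PySem.Chars.splitOn text.toList ['\n']).map String.ofList)).headD "")) width ≤ 0 := by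
          simp only [PySem.Str.len, PySem.Int.floordiv]
          exact Int.fdiv_nonpos_of_nonneg_of_nonpos (Int.natCast_nonneg _) (le_of_lt h)
        omega
      · exact absurd h hpre
      · exact h
    obtain ⟨l0, rest, hl⟩ : ∃ l0 rest,
        ((PySem.Chars.splitOn text.toList ['\n']).map String.ofList) = l0 :: rest := by
      cases h : ((PySem.Chars.splitOn text.toList ['\n']).map String.ofList) with
      | nil => exact absurd h (pvLinesNeNil text)
      | cons a b => exact ⟨a, b, rfl⟩
    set ng : Int := PySem.Int.floordiv
      (PySem.Str.len ((((PySem.Chars.splitOn text.toList ['\n']).map String.ofList)).headD "")) width with hngdef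
    clear_value ng
    clear hngdef
    obtain ⟨w', rfl⟩ : ∃ w' : Nat, width = (w' : Int) :=
      ⟨width.toNat, (Int.toNat_of_nonneg hwpos.le).symm⟩
    obtain ⟨ng', rfl⟩ : ∃ n : Nat, ng = (n : Int) :=
      ⟨ng.toNat, (Int.toNat_of_nonneg hng0.le).symm⟩
    have hw' : 0 < w' := by exact_mod_cast hwpos
    simp only [Int.toNat_natCast]
    -- B side
    have hB : ((((PySem.Chars.splitOn text.toList ['\n']).map String.ofList)).foldl
          (pvLineStep (w' : Int) (ng' : Int)) (List.replicate ng' [], true)).1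
        = (List.range ng').map (fun i => pvSeg w' i 0 l0.toList
            ++ rest.flatMap (fun l => '\n' :: pvSeg w' i 0 l.toList)) := by
      rw [hl, List.foldl_cons]
      have h1 : pvLineStep (w' : Int) (ng' : Int) (List.replicate ng' [], true) l0
          = ((PySem.List.enumerate l0.toList ((0 : Nat) : Int)).foldl (pvCharStep (w' : Int) (ng' : Int))
              (List.replicate ng' []), false) := by
        simp [pvLineStep]
      rw [h1]
      rw [pvCharFold w' ng' hw' l0.toList 0 _ (by simp)]
      rw [pvLineFold w' ng' hw' rest _ (by simp)]
      apply List.map_congr_left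
      intro i hi
      have hi' : i < ng' := List.mem_range.mp hi
      rw [PySem.List.getD_map_range _ _ _ _ hi', List.getD_replicate _ hi']
      simp
    rw [hB]
    -- A side
    rw [pvFoldlPush, List.nil_append, PySem.List.pyRange_one, List.map_map]
    simp only [Int.sub_zero, Int.toNat_natCast, List.map_map]
    apply List.map_congr_left
    intro k hk
    simp only [Function.comp_apply, Int.zero_add]
    rw [pvFoldlPush, List.nil_append, hl]
    exact pvGlyphEq w' hw' k l0 rest
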